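-- pv_equiv track=rewrite | github.com/bartdag/recodoc2 | recodoc2/apps/codeutil/java_element.py | clean_comments
-- ===== SOURCE A (Python) =====
-- def clean_comments(snippet):
--     new_snippet = ''
--     skip = True
--     for line in snippet.split('\n'):
--         temp = line.strip()
--         if skip and (temp.startswith('//') or temp.startswith('/*') or
--                 temp.startswith('*') or temp == ''):
--             continue
--         else:
--             skip = False
--             new_snippet += line + '\n'
--     return new_snippet
-- ===== SOURCE B (Python) =====
-- def _drop_leading(lines):
--     while lines:
--         t = lines[0].strip()
--         if t == '' or t.startswith(('//', '/*', '*')):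
--             lines = lines[1:]
--         else:
--             break
--     return lines
--
--
-- def clean_comments(snippet):
--     kept = _drop_leading(snippet.split('\n'))
--     return ''.join(l + '\n' for l in kept)
-- ===== Notes on version B (the rewrite author's own statement) =====
-- stated objective: simpler
-- what changed: Replaced A's fused skip-flag loop that appends into an accumulator with a two-phase decomposition: drop the leading comment/blank prefix first, then join the kept lines, re-appending a newline to each.
import Mathlib
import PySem

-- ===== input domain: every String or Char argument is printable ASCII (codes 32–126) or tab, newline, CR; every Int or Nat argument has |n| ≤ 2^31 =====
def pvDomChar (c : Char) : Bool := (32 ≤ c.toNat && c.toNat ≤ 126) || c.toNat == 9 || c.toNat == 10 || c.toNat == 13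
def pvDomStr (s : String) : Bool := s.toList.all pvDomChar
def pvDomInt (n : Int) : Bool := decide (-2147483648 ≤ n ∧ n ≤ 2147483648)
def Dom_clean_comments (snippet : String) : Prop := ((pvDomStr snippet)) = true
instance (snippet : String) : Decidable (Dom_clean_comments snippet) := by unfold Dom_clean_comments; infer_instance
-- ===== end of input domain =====

-- B strips the leading comment/blank lines by computing the kept suffix first (drop-prefix
-- phase) and then joining it, instead of A's fused skip-flag accumulator loop (objective:
-- simpler decomposition; same cost).

-- ===== PORT A =====
-- A's fused loop: state (skip, accumulated output chars)
def clean_comments (snippet : String) : String :=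
  let step := fun (st : Bool × List Char) (line : List Char) =>
    let temp := PySem.Chars.strip line
    if st.1 && (PySem.Chars.startswith temp "//".toList || PySem.Chars.startswith temp "/*".toList
        || PySem.Chars.startswith temp "*".toList || temp == []) then st
    else (false, st.2 ++ (line ++ ['\n']))
  String.ofList ((PySem.Chars.splitOn snippet.toList "\n".toList).foldl step (true, [])).2

-- ===== PORT B =====
def ccIsLeading (line : List Char) : Bool :=
  let t := PySem.Chars.strip line
  t == [] || PySem.Chars.startswith t "//".toList || PySem.Chars.startswith t "/*".toList
    || PySem.Chars.startswith t "*".toList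

-- B's _drop_leading while-loop
def ccDropLeading (lines : List (List Char)) : List (List Char) :=
  match lines with
  | [] => []
  | l :: ls => if ccIsLeading l then ccDropLeading ls else l :: ls

def clean_comments_alt (snippet : String) : String :=
  String.ofList (PySem.Chars.join []
    ((ccDropLeading (PySem.Chars.splitOn snippet.toList "\n".toList)).map (fun l => l ++ ['\n'])))

-- ===== PRECONDITION & SPEC =====
def Spec_clean_comments (snippet : String) (out : String) : Prop := out = clean_comments_alt snippet
instance (snippet : String) (out : String) : Decidable (Spec_clean_comments snippet out) := by unfold Spec_clean_comments; infer_instance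

-- ===== CLAIM (what is proved, stated in full; the proofs are below) =====
def Claim_equal_clean_comments : Prop := ∀ (snippet : String), Dom_clean_comments snippet → Spec_clean_comments snippet (clean_comments snippet)

-- ===== LEMMAS AND PROOFS =====

theorem cc_join_nil_eq_flatten (xs : List (List Char)) :
    PySem.Chars.join [] xs = xs.flatten := by
  induction xs with
  | nil => simp [PySem.Chars.join_nil]
  | cons x xs ih =>
    cases xs with
    | nil => simp [PySem.Chars.join_singleton]
    | cons y ys => simp [PySem.Chars.join_cons_cons] at *; simp [ih]

-- the step function of A's fold, named so lemmas can talk about it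
def ccStep (st : Bool × List Char) (line : List Char) : Bool × List Char :=
  let temp := PySem.Chars.strip line
  if st.1 && (PySem.Chars.startswith temp "//".toList || PySem.Chars.startswith temp "/*".toList
      || PySem.Chars.startswith temp "*".toList || temp == []) then st
  else (false, st.2 ++ (line ++ ['\n']))

theorem cc_if_cond {α : Type} (a b : Bool) (h : a = b) (x y : α) :
    (if a = true then x else y) = (if b = true then x else y) := by rw [h]

theorem cc_step_guard (st : Bool × List Char) (line : List Char) :
    ccStep st line =
      if st.1 && ccIsLeading line then st else (false, st.2 ++ (line ++ ['\n'])) := by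
  simp only [ccStep, ccIsLeading]
  refine cc_if_cond _ _ ?_ _ _
  cases h0 : (PySem.Chars.strip line == ([] : List Char)) <;>
    cases h1 : PySem.Chars.startswith (PySem.Chars.strip line) "//".toList <;>
    cases h2 : PySem.Chars.startswith (PySem.Chars.strip line) "/*".toList <;>
    cases h3 : PySem.Chars.startswith (PySem.Chars.strip line) "*".toList <;>
    simp only [h0, h1, h2, h3, Bool.or_true, Bool.or_false]

theorem cc_foldl_false (ls : List (List Char)) (acc : List Char) :
    (ls.foldl ccStep (false, acc)).2 = acc ++ (ls.map (fun l => l ++ ['\n'])).flatten := by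
  induction ls generalizing acc with
  | nil => simp
  | cons l ls ih => simp [cc_step_guard, ih]

theorem cc_foldl_true (ls : List (List Char)) :
    (ls.foldl ccStep (true, [])).2 = ((ccDropLeading ls).map (fun l => l ++ ['\n'])).flatten := by
  induction ls with
  | nil => simp [ccDropLeading]
  | cons l ls ih =>
    by_cases h : ccIsLeading l = true
    · simp [ccDropLeading, h, cc_step_guard, ih]
    · simp only [Bool.not_eq_true] at h
      simp [ccDropLeading, h, cc_step_guard, cc_foldl_false]

-- ===== VERDICT (by name: the statement is the Claim_ definition above) =====
theorem clean_comments_spec : Claim_equal_clean_comments := by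
  intro snippet _
  unfold Spec_clean_comments clean_comments clean_comments_alt
  rw [cc_join_nil_eq_flatten]
  show String.ofList ((PySem.Chars.splitOn snippet.toList "\n".toList).foldl ccStep (true, [])).2 = _
  rw [cc_foldl_true]
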